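-- pv_equiv track=rewrite | github.com/Michele-92/forensic-analysis-system | backend/modules/log_parser.py | _categorize_web_request
-- ===== SOURCE A (Python) =====
-- def _categorize_web_request(path: str, status: int, method: str) -> str:
--     """Kategorisiert Web-Requests nach Verdächtigkeitsgrad."""
--     path_lower = path.lower()
--
--     # SQLi-Muster
--     if any(p in path_lower for p in ["'", '"', ' or ', 'union+', 'union%20',
--                                       'select%20', '--', '1=1', '1%3d1']):
--         return 'sqli_attempt'
--
--     # XSS-Muster
--     if any(p in path_lower for p in ['<script', '%3cscript', 'onerror=',
--                                       'javascript:', 'alert(']):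
--         return 'xss_attempt'
--
--     # Path Traversal
--     if any(p in path_lower for p in ['../', '..%2f', '%2e%2e', '..../']):
--         return 'path_traversal'
--
--     # Web Shell / Code Execution
--     if any(p in path_lower for p in ['.php?', 'cmd=', 'exec=', 'system(',
--                                       'passthru', 'shell.php', 'webshell']):
--         return 'webshell_access'
--
--     # Sensible Pfade
--     if any(p in path_lower for p in ['/admin', '/login', '/wp-admin',
--                                       '/.env', '/config', '/passwd',
--                                       '/shadow', '/etc/', '/.git']):
--         return 'suspicious_request'
--
--     # Scanner-Muster (viele 404 von einer IP)
--     if status == 404: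
--         return 'http_error'
--     if status >= 500:
--         return 'http_server_error'
--     if status >= 400:
--         return 'http_error'
--
--     return 'http_request'
-- ===== SOURCE B (Python) =====
-- _TABLE = [
--     ('sqli_attempt', ["'", '"', ' or ', 'union+', 'union%20',
--                       'select%20', '--', '1=1', '1%3d1']),
--     ('xss_attempt', ['<script', '%3cscript', 'onerror=',
--                      'javascript:', 'alert(']),
--     ('path_traversal', ['../', '..%2f', '%2e%2e', '..../']),
--     ('webshell_access', ['.php?', 'cmd=', 'exec=', 'system(',
--                          'passthru', 'shell.php', 'webshell']),
--     ('suspicious_request', ['/admin', '/login', '/wp-admin',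
--                             '/.env', '/config', '/passwd',
--                             '/shadow', '/etc/', '/.git']),
-- ]
-- _CATS = [cat for cat, _ in _TABLE]
-- _FLAT = [(p, prio) for prio, (_, pats) in enumerate(_TABLE) for p in pats]
--
-- # index the flattened patterns by their first character
-- _BY_FIRST = {}
-- for _pat, _prio in _FLAT:
--     _BY_FIRST[_pat[0]] = _BY_FIRST.get(_pat[0], []) + [(_pat, _prio)]
--
--
-- def _categorize_web_request(path: str, status: int, method: str) -> str:
--     # Single left-to-right scan: at each position only the patterns whose first
--     # character matches are tried; keep the best (lowest) priority found anywhere.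
--     pl = path.lower()
--     best = len(_CATS)
--     for i in range(len(pl)):
--         for pat, prio in _BY_FIRST.get(pl[i], []):
--             if prio < best and pl.startswith(pat, i):
--                 best = prio
--     if best < len(_CATS):
--         return _CATS[best]
--     if status >= 500:
--         return 'http_server_error'
--     if status >= 400:
--         return 'http_error'
--     return 'http_request'
-- ===== Notes on version B (the rewrite author's own statement) =====
-- stated objective: alternative
-- what changed: Replaces A's per-category substring containment tests by a single left-to-right position scan of the path that consults a precomputed first-character -> (pattern, priority) index and keeps the minimum priority found, and collapses the status cascade to two range checks (404 absorbed into >=400).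
import Mathlib
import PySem

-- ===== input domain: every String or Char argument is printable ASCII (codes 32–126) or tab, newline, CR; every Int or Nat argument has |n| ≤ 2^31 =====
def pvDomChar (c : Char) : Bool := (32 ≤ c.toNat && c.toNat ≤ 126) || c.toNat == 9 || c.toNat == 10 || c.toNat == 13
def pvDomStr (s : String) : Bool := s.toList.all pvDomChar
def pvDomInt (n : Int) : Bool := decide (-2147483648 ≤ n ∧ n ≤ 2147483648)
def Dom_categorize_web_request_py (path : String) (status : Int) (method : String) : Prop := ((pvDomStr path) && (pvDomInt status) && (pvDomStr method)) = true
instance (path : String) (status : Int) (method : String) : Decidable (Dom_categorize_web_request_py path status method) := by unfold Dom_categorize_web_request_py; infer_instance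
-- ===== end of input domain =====

-- B replaces A's per-category substring tests by one left-to-right position scan that consults
-- a precomputed first-character index of a flattened (pattern, priority) list, keeping the
-- minimum priority found, and collapses the status cascade to two range checks
-- (objective: alternative algorithm; same return values).

-- ===== PORT A =====
def categorize_web_request_py (path : String) (status : Int) (method : String) : String :=
  let path_lower := PySem.Str.lower path
  if ["'", "\"", " or ", "union+", "union%20",
      "select%20", "--", "1=1", "1%3d1"].any (fun p => PySem.Str.isIn p path_lower) then
    "sqli_attempt"
  else if ["<script", "%3cscript", "onerror=",
           "javascript:", "alert("].any (fun p => PySem.Str.isIn p path_lower) then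
    "xss_attempt"
  else if ["../", "..%2f", "%2e%2e", "..../"].any (fun p => PySem.Str.isIn p path_lower) then
    "path_traversal"
  else if [".php?", "cmd=", "exec=", "system(",
           "passthru", "shell.php", "webshell"].any (fun p => PySem.Str.isIn p path_lower) then
    "webshell_access"
  else if ["/admin", "/login", "/wp-admin",
           "/.env", "/config", "/passwd",
           "/shadow", "/etc/", "/.git"].any (fun p => PySem.Str.isIn p path_lower) then
    "suspicious_request"
  else if status == 404 then "http_error"
  else if 500 ≤ status then "http_server_error"
  else if 400 ≤ status then "http_error"
  else "http_request"

-- ===== PORT B =====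
-- the five pattern groups of Source B's _TABLE, in priority order
def pvPats0 : List String := ["'", "\"", " or ", "union+", "union%20", "select%20", "--", "1=1", "1%3d1"]
def pvPats1 : List String := ["<script", "%3cscript", "onerror=", "javascript:", "alert("]
def pvPats2 : List String := ["../", "..%2f", "%2e%2e", "..../"]
def pvPats3 : List String := [".php?", "cmd=", "exec=", "system(", "passthru", "shell.php", "webshell"]
def pvPats4 : List String := ["/admin", "/login", "/wp-admin", "/.env", "/config", "/passwd", "/shadow", "/etc/", "/.git"]

def pvCats : List String :=
  ["sqli_attempt", "xss_attempt", "path_traversal", "webshell_access", "suspicious_request"]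

-- Source B's _FLAT: the table flattened to (pattern, priority) pairs
def pvFlat : List (List Char × Nat) :=
  (pvPats0.map (fun p => (p.toList, 0))) ++ (pvPats1.map (fun p => (p.toList, 1))) ++
  (pvPats2.map (fun p => (p.toList, 2))) ++ (pvPats3.map (fun p => (p.toList, 3))) ++
  (pvPats4.map (fun p => (p.toList, 4)))

-- pat[0], ported as headD ' ' (exact: every pattern in pvFlat is nonempty)
def pvFst (pq : List Char × Nat) : Char := pq.1.headD ' '

-- Source B's _BY_FIRST dict: patterns indexed by first character
def pvByFirst : PySem.Dict Char (List (List Char × Nat)) :=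
  pvFlat.foldl
    (fun d pq => d.insert (pvFst pq) (d.getD (pvFst pq) [] ++ [pq]))
    PySem.Dict.empty

-- one candidate pattern at the current position
def pvScanStep (s : List Char) (b : Nat) (pq : List Char × Nat) : Nat :=
  if pq.2 < b && PySem.Chars.startswith s pq.1 then pq.2 else b

def categorize_web_request_py_alt (path : String) (status : Int) (method : String) : String :=
  let pl := (PySem.Str.lower path).toList
  -- for i in range(len(pl)): pl[i] is ported as (pl.drop i).headD ' ' and
  -- pl.startswith(pat, i) as startswith on pl.drop i (exact: i < pl.length, suffix nonempty)
  let best := (List.range pl.length).foldl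
      (fun b i => (pvByFirst.getD ((pl.drop i).headD ' ') []).foldl (pvScanStep (pl.drop i)) b)
      pvCats.length
  if best < pvCats.length then pvCats.getD best ""
  else if 500 ≤ status then "http_server_error"
  else if 400 ≤ status then "http_error"
  else "http_request"

-- ===== PRECONDITION & SPEC =====
def Spec_categorize_web_request_py (path : String) (status : Int) (method : String) (out : String) : Prop := out = categorize_web_request_py_alt path status method
instance (path : String) (status : Int) (method : String) (out : String) : Decidable (Spec_categorize_web_request_py path status method out) := by unfold Spec_categorize_web_request_py; infer_instance

-- ===== CLAIM (what is proved, stated in full; the proofs are below) =====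
def Claim_equal_categorize_web_request_py : Prop := ∀ (path : String) (status : Int) (method : String), Dom_categorize_web_request_py path status method → Spec_categorize_web_request_py path status method (categorize_web_request_py path status method)

-- ===== LEMMAS AND PROOFS =====

-- the grouping fold builds exactly the in-order filter by first character
lemma getD_group (l : List (List Char × Nat)) :
    ∀ (d : PySem.Dict Char (List (List Char × Nat))) (c : Char),
      (l.foldl
        (fun d pq => d.insert (pvFst pq) (d.getD (pvFst pq) [] ++ [pq])) d).getD c []
        = d.getD c [] ++ l.filter (fun pq => pvFst pq == c) := by
  induction l with
  | nil => intro d c; simp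
  | cons pq t ih =>
    intro d c
    simp only [List.foldl_cons, List.filter_cons]
    rw [ih]
    by_cases h : pvFst pq = c
    · simp [h]
    · simp [PySem.Dict.getD_insert, h, Ne.symm h]

lemma getD_byFirst (c : Char) :
    pvByFirst.getD c [] = pvFlat.filter (fun pq => pvFst pq == c) := by
  rw [pvByFirst, getD_group]
  simp

-- patterns whose first character is not c never match at a position starting with c
lemma filter_scan (c : Char) (t : List Char) (l : List (List Char × Nat))
    (hne : ∀ pq ∈ l, pq.1 ≠ []) :
    ∀ b : Nat,
      (l.filter (fun pq => pvFst pq == c)).foldl (pvScanStep (c :: t)) b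
        = l.foldl (pvScanStep (c :: t)) b := by
  induction l with
  | nil => intro b; simp
  | cons pq l' ih =>
    intro b
    have hne' : ∀ x ∈ l', x.1 ≠ [] := fun x hx => hne x (List.mem_cons_of_mem _ hx)
    simp only [List.filter_cons, List.foldl_cons]
    by_cases h : pvFst pq = c
    · simp only [h, beq_self_eq_true, if_true, List.foldl_cons]
      exact ih hne' _
    · have hhd : pq.1 ≠ [] := hne pq List.mem_cons_self
      obtain ⟨a, p', hp⟩ := List.exists_cons_of_ne_nil hhd
      have hac : a ≠ c := by
        intro hac; apply h; rw [pvFst, hp, hac]; rfl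
      have hsw : PySem.Chars.startswith (c :: t) pq.1 = false := by
        rw [hp]
        cases hb : PySem.Chars.startswith (c :: t) (a :: p') with
        | false => rfl
        | true =>
          have := (PySem.Chars.startswith_iff _ _).mp hb
          rw [List.cons_prefix_cons] at this
          exact absurd this.1 hac
      have hstep : pvScanStep (c :: t) b pq = b := by simp [pvScanStep, hsw]
      simp only [show (pvFst pq == c) = false from by simp [h], Bool.false_eq_true, if_false, hstep]
      exact ih hne' b

-- reference form of the scan: structural recursion over the suffixes, all patterns tried
def pvScan : List Char → Nat → Nat
  | [], b => b
  | c :: rest, b => pvScan rest (pvFlat.foldl (pvScanStep (c :: rest)) b)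

-- the indexed position loop of the port equals the reference suffix recursion
lemma range_scan (pl : List Char) : ∀ b : Nat,
    (List.range pl.length).foldl
        (fun b i => (pvByFirst.getD ((pl.drop i).headD ' ') []).foldl (pvScanStep (pl.drop i)) b) b
      = pvScan pl b := by
  induction pl with
  | nil => intro b; simp [pvScan]
  | cons c t ih =>
    intro b
    have hne : ∀ pq ∈ pvFlat, pq.1 ≠ [] := by decide
    simp only [List.length_cons, List.range_succ_eq_map, List.foldl_cons, List.foldl_map,
      List.drop_succ_cons, List.drop_zero, List.headD_cons, pvScan]
    rw [getD_byFirst, filter_scan c t pvFlat hne b]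
    exact ih _

-- min-step form of one candidate test
def pvMinStep (f : List Char × Nat → Bool) (b : Nat) (pq : List Char × Nat) : Nat :=
  if f pq then min b pq.2 else b

lemma pvScanStep_eq_minStep (s : List Char) (b : Nat) (pq : List Char × Nat) :
    pvScanStep s b pq = pvMinStep (fun pq => PySem.Chars.startswith s pq.1) b pq := by
  unfold pvScanStep pvMinStep
  by_cases h : PySem.Chars.startswith s pq.1 = true
  · simp [h]; split <;> omega
  · simp [h]

lemma foldl_minStep_min (f : List Char × Nat → Bool) (l : List (List Char × Nat)) :
    ∀ b c : Nat, l.foldl (pvMinStep f) (min b c) = min b (l.foldl (pvMinStep f) c) := by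
  induction l with
  | nil => intro b c; simp
  | cons pq t ih =>
    intro b c
    simp only [List.foldl_cons]
    rw [show pvMinStep f (min b c) pq = min b (pvMinStep f c pq) by
      unfold pvMinStep; split <;> omega]
    exact ih b _

-- the minimum priority of a pattern occurring anywhere in s
def pvBest (s : List Char) : Nat :=
  pvFlat.foldl (pvMinStep (fun pq => PySem.Chars.isIn pq.1 s)) 5

lemma isIn_cons (p : List Char) (c : Char) (t : List Char) :
    PySem.Chars.isIn p (c :: t) = (PySem.Chars.startswith (c :: t) p || PySem.Chars.isIn p t) := by
  rw [Bool.eq_iff_iff]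
  simp only [Bool.or_eq_true, PySem.Chars.isIn_iff_infix, PySem.Chars.startswith_iff]
  exact List.infix_cons_iff

lemma foldl_minStep_or (f g : List Char × Nat → Bool) (l : List (List Char × Nat)) :
    ∀ b c : Nat,
      l.foldl (pvMinStep (fun pq => f pq || g pq)) (min b c)
        = min (l.foldl (pvMinStep f) b) (l.foldl (pvMinStep g) c) := by
  induction l with
  | nil => intro b c; simp
  | cons pq t ih =>
    intro b c
    simp only [List.foldl_cons]
    rw [show pvMinStep (fun pq => f pq || g pq) (min b c) pq
          = min (pvMinStep f b pq) (pvMinStep g c pq) by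
      unfold pvMinStep
      by_cases hf : f pq = true <;> by_cases hg : g pq = true <;> simp [hf, hg] <;> omega]
    exact ih _ _

lemma pvBest_cons (c : Char) (t : List Char) :
    pvBest (c :: t)
      = min (pvFlat.foldl (pvMinStep (fun pq => PySem.Chars.startswith (c :: t) pq.1)) 5)
            (pvBest t) := by
  unfold pvBest
  have hfun : (pvMinStep (fun pq => PySem.Chars.isIn pq.1 (c :: t)))
      = pvMinStep (fun pq : List Char × Nat =>
          PySem.Chars.startswith (c :: t) pq.1 || PySem.Chars.isIn pq.1 t) := by
    funext b pq; rw [pvMinStep, pvMinStep, isIn_cons]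
  rw [hfun]
  have h := foldl_minStep_or (fun pq => PySem.Chars.startswith (c :: t) pq.1)
      (fun pq => PySem.Chars.isIn pq.1 t) pvFlat 5 5
  simpa using h

lemma pvScan_eq (s : List Char) : ∀ b : Nat, b ≤ 5 → pvScan s b = min b (pvBest s) := by
  induction s with
  | nil => intro b hb; unfold pvScan; rw [show pvBest [] = 5 from by decide]; omega
  | cons c t ih =>
    intro b hb
    unfold pvScan
    have hstep : pvFlat.foldl (pvScanStep (c :: t)) b
        = min b (pvFlat.foldl (pvMinStep (fun pq => PySem.Chars.startswith (c :: t) pq.1)) 5) := by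
      rw [show (pvFlat.foldl (pvScanStep (c :: t)) b)
            = pvFlat.foldl (pvMinStep (fun pq => PySem.Chars.startswith (c :: t) pq.1)) b from by
          congr 1; funext x y; exact pvScanStep_eq_minStep _ _ _]
      have h2 := foldl_minStep_min (fun pq => PySem.Chars.startswith (c :: t) pq.1) pvFlat b 5
      rw [show min b 5 = b from by omega] at h2
      exact h2
    rw [hstep, ih _ (by omega), pvBest_cons]
    omega

-- a constant-priority block folds to an 'any' test
lemma foldl_block (s : List Char) (k : Nat) (pats : List String) (a : Nat) :
    (pats.map (fun p => (p.toList, k))).foldl (pvMinStep (fun pq => PySem.Chars.isIn pq.1 s)) a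
      = if pats.any (fun p => PySem.Chars.isIn p.toList s) then min a k else a := by
  induction pats generalizing a with
  | nil => simp
  | cons p t ih =>
    simp only [List.map_cons, List.foldl_cons, List.any_cons]
    by_cases h : PySem.Chars.isIn p.toList s = true
    · rw [show pvMinStep (fun pq => PySem.Chars.isIn pq.1 s) a (p.toList, k) = min a k from by
        simp [pvMinStep, h]]
      rw [ih]
      simp only [h, Bool.true_or, if_true]
      split <;> omega
    · rw [show pvMinStep (fun pq => PySem.Chars.isIn pq.1 s) a (p.toList, k) = a from by
        simp [pvMinStep, h]]
      rw [ih]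
      simp [h]

lemma pvBest_chain (s : List Char) :
    pvBest s =
      if pvPats0.any (fun p => PySem.Chars.isIn p.toList s) then 0
      else if pvPats1.any (fun p => PySem.Chars.isIn p.toList s) then 1
      else if pvPats2.any (fun p => PySem.Chars.isIn p.toList s) then 2
      else if pvPats3.any (fun p => PySem.Chars.isIn p.toList s) then 3
      else if pvPats4.any (fun p => PySem.Chars.isIn p.toList s) then 4
      else 5 := by
  unfold pvBest pvFlat
  rw [List.foldl_append, List.foldl_append, List.foldl_append, List.foldl_append]
  rw [foldl_block, foldl_block, foldl_block, foldl_block, foldl_block]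
  split_ifs <;> simp_all

-- ===== VERDICT (by name: the statement is the Claim_ definition above) =====
theorem categorize_web_request_py_spec : Claim_equal_categorize_web_request_py := by
  intro path status method _
  unfold Spec_categorize_web_request_py categorize_web_request_py categorize_web_request_py_alt
  simp only [pvCats, List.length_cons, List.length_nil,
    range_scan _ _, pvScan_eq _ _ (by omega : (5 : Nat) ≤ 5), pvBest_chain,
    PySem.Str.isIn_eq, pvPats0, pvPats1, pvPats2, pvPats3, pvPats4,
    List.any_cons, List.any_nil]
  split_ifs <;> simp_all
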